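-- pv_equiv track=rewrite | github.com/SonicSlayer/SonicSlayer-Tools | tools.py | decode_chars
-- ===== SOURCE A (Python) =====
-- def decode_chars(chars):
--     res = ""
--     for c in chars:
--         if (c < 0x20 and c not in (0x0A, 0x0D, 0x09)) or (0x7F <= c <= 0x9F):
--             res += f"<{c:02X}>"
--         else:
--             res += chr(c)
--     return res
-- ===== SOURCE B (Python) =====
-- def _esc(c):
--     return (0 <= c < 0x20 and c not in (0x09, 0x0A, 0x0D)) or 0x7F <= c <= 0x9F
--
--
-- def decode_chars(chars):
--     # Two-pointer run segmentation: scan for the next escapable code, decode the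
--     # whole plain run in one slice, emit the marker, continue after it.
--     parts = []
--     i, n = 0, len(chars)
--     while i < n:
--         j = i
--         while j < n and not _esc(chars[j]):
--             j += 1
--         parts.append(''.join(map(chr, chars[i:j])))
--         if j < n:
--             parts.append(f'<{chars[j]:02X}>')
--             j += 1
--         i = j
--     return ''.join(parts)
-- ===== Notes on version B (the rewrite author's own statement) =====
-- stated objective: alternative
-- what changed: B replaces A's per-character if/else string-building loop by a two-pointer run segmentation: an inner scan finds the next escapable code, the whole plain run between markers is decoded with one slice+join, and the chunks are joined at the end.
-- outside the precondition, e.g. on decode_chars([-1]): A returns '<-1>', B raises ValueError; on decode_chars([1114112]): A raises ValueError, B raises ValueError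
import Mathlib
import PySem

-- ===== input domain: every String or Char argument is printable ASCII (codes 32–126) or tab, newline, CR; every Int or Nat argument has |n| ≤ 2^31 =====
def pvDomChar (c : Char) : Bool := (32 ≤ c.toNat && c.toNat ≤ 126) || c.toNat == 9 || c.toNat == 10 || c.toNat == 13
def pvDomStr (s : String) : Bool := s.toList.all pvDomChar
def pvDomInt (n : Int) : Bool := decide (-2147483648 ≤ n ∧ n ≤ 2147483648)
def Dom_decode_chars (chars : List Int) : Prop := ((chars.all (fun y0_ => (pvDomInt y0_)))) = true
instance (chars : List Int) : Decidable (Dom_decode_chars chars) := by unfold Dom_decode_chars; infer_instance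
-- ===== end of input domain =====

-- B replaces A's per-character if/else string-building loop by a two-pointer run
-- segmentation: an inner scan finds the next escapable code, each plain run is decoded
-- in one slice, the chunks are joined at the end (alternative decomposition, same cost).

-- shared helper: f"{n:02X}" for a Nat (uppercase hex, zero-padded to width 2)
def pvHexDig (n : Nat) : Char := if n < 10 then Char.ofNat (48 + n) else Char.ofNat (55 + n)

def pvHexDigits (n : Nat) : List Char :=
  if h : n < 16 then [pvHexDig n]
  else pvHexDigits (n / 16) ++ [pvHexDig (n % 16)]
decreasing_by exact Nat.div_lt_self (by omega) (by omega)

def pvFmt (c : Int) : List Char :=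
  let ds := pvHexDigits c.toNat
  '<' :: (List.replicate (2 - ds.length) '0' ++ ds) ++ ['>']

-- ===== PORT A =====
def decode_chars (chars : List Int) : String :=
  String.mk (chars.foldl
    (fun res c =>
      res ++ (if (c < 0x20 ∧ ¬(c = 0x0A ∨ c = 0x0D ∨ c = 0x09)) ∨ (0x7F ≤ c ∧ c ≤ 0x9F)
              then pvFmt c
              else [Char.ofNat c.toNat])) [])

-- ===== PORT B =====
-- _esc(c) from Source B
def pvEsc (c : Int) : Bool :=
  ((0 ≤ c ∧ c < 0x20) ∧ ¬(c = 0x09 ∨ c = 0x0A ∨ c = 0x0D)) ∨ (0x7F ≤ c ∧ c ≤ 0x9F)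

-- inner 'while j < n and not _esc(chars[j]): j += 1'
def pvFind (chars : List Int) (j : Nat) : Nat :=
  if h : j < chars.length ∧ pvEsc (chars.getD j 0) = false then pvFind chars (j + 1) else j
termination_by chars.length - j
decreasing_by omega

theorem pvFind_ge (chars : List Int) (j : Nat) : j ≤ pvFind chars j := by
  unfold pvFind
  split
  · exact Nat.le_trans (by omega) (pvFind_ge chars (j + 1))
  · exact Nat.le_refl j
termination_by chars.length - j
decreasing_by omega

-- outer while loop of Source B, producing the list 'parts' (chunks of chars)
def pvLoop (chars : List Int) (i : Nat) : List (List Char) :=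
  if h : i < chars.length then
    let j := pvFind chars i
    let chunk := (PySem.List.slice chars (some (i : Int)) (some (j : Int))).map
      (fun c => Char.ofNat c.toNat)
    if hj : j < chars.length then
      chunk :: pvFmt (chars.getD j 0) :: pvLoop chars (j + 1)
    else [chunk]
  else []
termination_by chars.length - i
decreasing_by have := pvFind_ge chars i; omega

-- ''.join(parts)
def decode_chars_alt (chars : List Int) : String :=
  String.mk (pvLoop chars 0).flatten

-- ===== PRECONDITION & SPEC =====
-- Pre_ excludes negative code points (A formats a '<-XX>' marker while B's chr raises
-- ValueError), codes above 0x10FFFF (both programs' chr raises ValueError) and lone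
-- surrogate code points (A returns a string that is not representable as a Lean String).
def Pre_decode_chars (chars : List Int) : Prop :=
  ∀ c ∈ chars, 0 ≤ c ∧ c ≤ 0x10FFFF ∧ ¬(0xD800 ≤ c ∧ c ≤ 0xDFFF)
instance (chars : List Int) : Decidable (Pre_decode_chars chars) := by
  unfold Pre_decode_chars; infer_instance

def pvWitness_decode_chars : List Int := [72, 0, 159, 10, 127, 65]

def Spec_decode_chars (chars : List Int) (out : String) : Prop := out = decode_chars_alt chars
instance (chars : List Int) (out : String) : Decidable (Spec_decode_chars chars out) := by
  unfold Spec_decode_chars; infer_instance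

-- ===== CLAIM (what is proved, stated in full; the proofs are below) =====
def Claim_equal_decode_chars : Prop :=
  ∀ (chars : List Int), Dom_decode_chars chars → Pre_decode_chars chars →
    Spec_decode_chars chars (decode_chars chars)

-- ===== LEMMAS AND PROOFS =====

-- per-character output, common to both sides
def pvOut (c : Int) : List Char :=
  if pvEsc c then pvFmt c else [Char.ofNat c.toNat]

theorem pvFind_le (chars : List Int) (j : Nat) (h : j ≤ chars.length) :
    pvFind chars j ≤ chars.length := by
  unfold pvFind
  split
  · exact pvFind_le chars (j + 1) (by omega)
  · exact h
termination_by chars.length - j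
decreasing_by omega

theorem pvFind_not_esc (chars : List Int) (j k : Nat) (hjk : j ≤ k)
    (hk : k < pvFind chars j) : pvEsc (chars.getD k 0) = false := by
  unfold pvFind at hk
  split at hk
  · rename_i hcond
    rcases Nat.eq_or_lt_of_le hjk with rfl | hlt
    · exact hcond.2
    · exact pvFind_not_esc chars (j + 1) k hlt hk
  · omega
termination_by chars.length - j
decreasing_by omega

theorem pvFind_stop (chars : List Int) (j : Nat)
    (h : pvFind chars j < chars.length) : pvEsc (chars.getD (pvFind chars j) 0) = true := by
  by_cases hc : j < chars.length ∧ pvEsc (chars.getD j 0) = false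
  · rw [pvFind, dif_pos hc] at h ⊢
    exact pvFind_stop chars (j + 1) h
  · rw [pvFind, dif_neg hc] at h ⊢
    rcases Bool.eq_false_or_eq_true (pvEsc (chars.getD j 0)) with he | he
    · exact he
    · exact absurd ⟨h, he⟩ hc
termination_by chars.length - j
decreasing_by omega

theorem flatMap_no_esc (l : List Int) (h : ∀ c ∈ l, pvEsc c = false) :
    l.flatMap pvOut = l.map (fun c => Char.ofNat c.toNat) := by
  induction l with
  | nil => rfl
  | cons c l ih =>
    simp only [List.flatMap_cons, List.map_cons, pvOut, h c List.mem_cons_self,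
      Bool.false_eq_true, if_false, ih (fun x hx => h x (List.mem_cons_of_mem _ hx))]
    rfl

-- main invariant: the flattened parts from index i equal the per-character outputs of the suffix
theorem pvLoop_flatten (chars : List Int) (i : Nat) :
    (pvLoop chars i).flatten = (chars.drop i).flatMap pvOut := by
  rw [pvLoop]
  split
  · rename_i hi
    have hji := pvFind_ge chars i
    have hjn := pvFind_le chars i (by omega)
    set j := pvFind chars i with hj
    have hslice : PySem.List.slice chars (some (i : Int)) (some (j : Int)) =
        (chars.drop i).take (j - i) := PySem.List.slice_natCast ..
    have hdrop : chars.drop i = (chars.drop i).take (j - i) ++ chars.drop j := by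
      have hdd : chars.drop j = (chars.drop i).drop (j - i) := by
        rw [List.drop_drop]; congr 1; omega
      rw [hdd, List.take_append_drop]
    have hchunk : ((chars.drop i).take (j - i)).flatMap pvOut =
        ((chars.drop i).take (j - i)).map (fun c => Char.ofNat c.toNat) := by
      apply flatMap_no_esc
      intro c hc
      obtain ⟨k, hk, rfl⟩ := List.getElem_of_mem hc
      have hlen : k < j - i ∧ i + k < chars.length := by
        simp only [List.length_take, List.length_drop] at hk; omega
      have hgk : ((chars.drop i).take (j - i))[k] = chars[i + k]'hlen.2 := by
        simp [List.getElem_take, List.getElem_drop]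
      rw [hgk, ← List.getD_eq_getElem chars 0 hlen.2]
      exact pvFind_not_esc chars i (i + k) (by omega) (by omega)
    simp only [hslice]
    conv_rhs => rw [hdrop]
    rw [List.flatMap_append, hchunk]
    split
    · rename_i hjlt
      have hdropj : chars.drop j = chars[j] :: chars.drop (j + 1) :=
        (List.getElem_cons_drop (as := chars) hjlt).symm
      have hgd : chars.getD j 0 = chars[j] := List.getD_eq_getElem chars 0 hjlt
      have hesc : pvEsc chars[j] = true := hgd ▸ pvFind_stop chars i hjlt
      have hout : pvOut chars[j] = pvFmt (chars.getD j 0) := by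
        rw [pvOut, if_pos hesc, hgd]
      rw [hdropj, List.flatMap_cons, hout, List.flatten_cons, List.flatten_cons,
        pvLoop_flatten chars (j + 1)]
    · rename_i hjge
      have : chars.drop j = [] := List.drop_eq_nil_of_le (by omega)
      simp [this]
  · rename_i hi
    rw [List.drop_eq_nil_of_le (by omega)]
    rfl
termination_by chars.length - i
decreasing_by have := pvFind_ge chars i; omega

theorem decode_chars_spec' (chars : List Int) (hpre : Pre_decode_chars chars) :
    decode_chars chars = decode_chars_alt chars := by
  unfold decode_chars decode_chars_alt
  rw [PySem.List.foldl_append_eq_flatMap, List.nil_append, pvLoop_flatten, List.drop_zero]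
  refine congrArg String.mk (List.flatMap_congr fun c hc => ?_)
  obtain ⟨h0, -, -⟩ := hpre c hc
  have he : pvEsc c = true ↔
      ((c < 0x20 ∧ ¬(c = 0x0A ∨ c = 0x0D ∨ c = 0x09)) ∨ (0x7F ≤ c ∧ c ≤ 0x9F)) := by
    simp only [pvEsc]
    constructor
    · intro h; simp at h; omega
    · intro h; simp; omega
  unfold pvOut
  by_cases h : (c < 0x20 ∧ ¬(c = 0x0A ∨ c = 0x0D ∨ c = 0x09)) ∨ (0x7F ≤ c ∧ c ≤ 0x9F)
  · rw [if_pos h, if_pos (he.mpr h)]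
  · rw [if_neg h, if_neg (fun hb => h (he.mp hb))]

-- ===== VERDICT (by name: the statement is the Claim_ definition above) =====
theorem decode_chars_spec : Claim_equal_decode_chars := by
  intro chars _ hpre
  unfold Spec_decode_chars
  exact decode_chars_spec' chars hpre
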